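-- pv_equiv track=rewrite | github.com/felipefoschiera/Competitive-Programming | URI/Iniciante/2139 - Natal de Pedrinho/natal.py | tempo
-- ===== SOURCE A (Python) =====
-- meses =[31, 29, 31, 30, 31, 30, 31, 31, 30, 31, 30, 25]
--
-- def tempo(mes, dia):
--     if mes == 12 and dia == 25:
--         return "E natal!"
--     if mes == 12 and dia > 25:
--         return "Ja passou!"
--     if mes == 12 and dia == 24:
--         return "E vespera de natal!"
--     # 11 24
--     tempo_dias = meses[mes-1] - dia
--
--     for i in range(mes, 12):
--         tempo_dias += meses[i]
--     return "Faltam {} dias para o natal!".format(tempo_dias)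
-- ===== SOURCE B (Python) =====
-- meses = [31, 29, 31, 30, 31, 30, 31, 31, 30, 31, 30, 25]
--
-- # Precomputed once: REST[m] = days from the start of month m through Dec 25.
-- REST = {}
-- _acc = 0
-- for _m in range(12, 0, -1):
--     _acc += meses[_m - 1]
--     REST[_m] = _acc
--
--
-- def tempo(mes, dia):
--     if mes == 12:
--         if dia == 25:
--             return "E natal!"
--         if dia > 25:
--             return "Ja passou!"
--         if dia == 24:
--             return "E vespera de natal!"
--     return "Faltam {} dias para o natal!".format(REST[mes] - dia)
-- ===== Notes on version B (the rewrite author's own statement) =====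
-- stated objective: simpler
-- what changed: Replaces the per-call month-by-month summation loop with a module-load cumulative table REST (days remaining from each month's start to Dec 25) so the body is a single dict lookup minus dia.
-- outside the precondition, e.g. on tempo(-1, 5): A returns 'Faltam 410 dias para o natal!', B raises KeyError
import Mathlib
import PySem

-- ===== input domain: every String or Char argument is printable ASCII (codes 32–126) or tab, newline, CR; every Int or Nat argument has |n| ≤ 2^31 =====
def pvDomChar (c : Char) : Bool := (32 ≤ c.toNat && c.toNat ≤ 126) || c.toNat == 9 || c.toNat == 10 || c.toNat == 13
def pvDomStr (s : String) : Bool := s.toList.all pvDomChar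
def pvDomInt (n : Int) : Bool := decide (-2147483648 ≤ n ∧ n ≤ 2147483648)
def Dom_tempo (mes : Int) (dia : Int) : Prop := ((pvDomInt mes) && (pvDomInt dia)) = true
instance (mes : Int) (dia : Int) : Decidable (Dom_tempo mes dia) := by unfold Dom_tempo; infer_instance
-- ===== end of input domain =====

-- B replaces A's per-call summation loop by a precomputed cumulative table (one lookup); return values proved equal for months 1..12.

-- ===== PORT A =====
def mesesA : List Int := [31, 29, 31, 30, 31, 30, 31, 31, 30, 31, 30, 25]

def tempo (mes : Int) (dia : Int) : String :=
  if mes = 12 ∧ dia = 25 then "E natal!"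
  else if mes = 12 ∧ dia > 25 then "Ja passou!"
  else if mes = 12 ∧ dia = 24 then "E vespera de natal!"
  else
    -- meses[mes-1]: in range under Pre_tempo (1 ≤ mes ≤ 12), so getD 0 is exact there
    let t0 := (PySem.List.pyGetD mesesA (mes - 1) 0) - dia
    let t := (PySem.List.pyRange mes 12 1).foldl
      (fun acc i => acc + PySem.List.pyGetD mesesA i 0) t0
    "Faltam " ++ PySem.Int.toStr t ++ " dias para o natal!"

-- ===== PORT B =====
def mesesB : List Int := [31, 29, 31, 30, 31, 30, 31, 31, 30, 31, 30, 25]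

-- module-load loop building REST: for _m in range(12, 0, -1): _acc += meses[_m-1]; REST[_m] = _acc
def restD : PySem.Dict Int Int :=
  ((PySem.List.pyRange 12 0 (-1)).foldl
    (fun (st : Int × PySem.Dict Int Int) m =>
      let acc := st.1 + PySem.List.pyGetD mesesB (m - 1) 0
      (acc, st.2.insert m acc))
    (0, PySem.Dict.empty)).2

def tempo_alt (mes : Int) (dia : Int) : String :=
  if mes = 12 then
    if dia = 25 then "E natal!"
    else if dia > 25 then "Ja passou!"
    else if dia = 24 then "E vespera de natal!"
    -- REST[mes]: present for 1 ≤ mes ≤ 12 (Pre_tempo), so getD 0 is exact there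
    else "Faltam " ++ PySem.Int.toStr (restD.getD mes 0 - dia) ++ " dias para o natal!"
  else "Faltam " ++ PySem.Int.toStr (restD.getD mes 0 - dia) ++ " dias para o natal!"

-- ===== PRECONDITION & SPEC =====
-- Pre_ excludes mes outside 1..12: there A either raises IndexError (mes < -11 or mes > 12)
-- or, for -11 ≤ mes ≤ 0, returns a value produced by Python's negative-index wraparound,
-- where B's month-keyed table naturally raises KeyError.
def Pre_tempo (mes : Int) (dia : Int) : Prop := 1 ≤ mes ∧ mes ≤ 12
instance (mes : Int) (dia : Int) : Decidable (Pre_tempo mes dia) := by unfold Pre_tempo; infer_instance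
def pvWitness_tempo : Int × Int := (11, 24)

def Spec_tempo (mes : Int) (dia : Int) (out : String) : Prop := out = tempo_alt mes dia
instance (mes : Int) (dia : Int) (out : String) : Decidable (Spec_tempo mes dia out) := by unfold Spec_tempo; infer_instance

-- ===== CLAIM =====
def Claim_equal_tempo : Prop := ∀ (mes : Int) (dia : Int), Dom_tempo mes dia → Pre_tempo mes dia → Spec_tempo mes dia (tempo mes dia)

-- ===== LEMMAS AND PROOFS =====
set_option maxHeartbeats 1000000

theorem restD_eval : restD = PySem.Dict.mk
    [(12, 25), (11, 55), (10, 86), (9, 116), (8, 147), (7, 178), (6, 208),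
     (5, 239), (4, 269), (3, 300), (2, 329), (1, 360)] := by decide

-- ===== VERDICT =====
theorem tempo_spec : Claim_equal_tempo := by
  intro mes dia _ hpre
  obtain ⟨h1, h2⟩ := hpre
  unfold Spec_tempo tempo tempo_alt
  rw [restD_eval]
  interval_cases mes <;>
    norm_num [PySem.List.pyRange_one_cons, PySem.List.pyRange_one_eq_nil,
      PySem.List.pyGetD, PySem.List.pyIdx?, PySem.List.pyGet?, mesesA,
      PySem.Dict.getD, PySem.Dict.get?_mk_cons, List.foldl,
      List.getElem_cons_succ, List.getElem_cons_zero]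
  all_goals first
    | rfl
    | (congr 1; try norm_num [Int.toNat]; omega)
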